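-- pv_equiv track=rewrite | github.com/Prasanna401623/SafeRoute | backend/safeRoute/alerts/utils.py | determine_severity_from_data
-- ===== SOURCE A (Python) =====
-- def determine_severity_from_data(text):
--     """
--     Map keywords in the text to a severity score.
--     Higher numbers indicate more severe incidents.
--     """
--     mapping = {
--         'rape': 5,
--         'assault': 4,
--         'robbery': 4,
--         'burglary': 3,
--         'theft': 2,
--         'suspicious': 1,
--         'disturbance': 1
--     }
--     text_lower = text.lower()
--     severity = None
--     for keyword, score in mapping.items():
--         if keyword in text_lower:
--             if severity is None or score > severity:
--                 severity = score
--
--     return severity if severity is not None else 1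
-- ===== SOURCE B (Python) =====
-- PRIORITY = [
--     ('rape', 5),
--     ('assault', 4),
--     ('robbery', 4),
--     ('burglary', 3),
--     ('theft', 2),
--     ('suspicious', 1),
--     ('disturbance', 1),
-- ]
--
-- def determine_severity_from_data(text):
--     """Return the score of the first keyword (in descending-score order) found in text; 1 if none."""
--     text_lower = text.lower()
--     for keyword, score in PRIORITY:
--         if keyword in text_lower:
--             return score
--     return 1
-- ===== Notes on version B (the rewrite author's own statement) =====
-- stated objective: simpler
-- what changed: Replaces the running-max accumulator with a None sentinel by a single early-return walk over a list of (keyword, score) pairs pre-sorted in descending score order; the first hit is the maximum, the fall-through default is 1.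
import Mathlib
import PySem

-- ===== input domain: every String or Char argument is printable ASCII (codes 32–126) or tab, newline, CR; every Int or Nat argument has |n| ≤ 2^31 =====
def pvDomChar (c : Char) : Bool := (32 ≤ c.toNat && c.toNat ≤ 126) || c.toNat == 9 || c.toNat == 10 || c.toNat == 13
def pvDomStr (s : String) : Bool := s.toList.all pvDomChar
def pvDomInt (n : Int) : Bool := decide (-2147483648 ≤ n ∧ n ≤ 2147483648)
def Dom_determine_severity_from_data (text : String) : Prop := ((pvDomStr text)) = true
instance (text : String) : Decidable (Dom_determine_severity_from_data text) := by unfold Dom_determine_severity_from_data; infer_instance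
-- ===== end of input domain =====

-- B replaces the running-max scan with an early-return walk over a score-descending keyword list (objective: simpler).


-- ===== PORT A =====
-- max-tracking scan over the dict with a None sentinel (literal port of A)
def determine_severity_from_data (text : String) : Int :=
  let mapping : PySem.Dict String Int := PySem.Dict.ofList
    [("rape", 5), ("assault", 4), ("robbery", 4), ("burglary", 3),
     ("theft", 2), ("suspicious", 1), ("disturbance", 1)]
  let text_lower := PySem.Str.lower text
  let severity : Option Int := mapping.items.foldl (fun severity kv =>
    if PySem.Str.isIn kv.1 text_lower then
      match severity with
      | none => some kv.2
      | some s => if kv.2 > s then some kv.2 else some s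
    else severity) none
  match severity with
  | some s => s
  | none => 1

-- ===== PORT B =====
-- B: priority-ordered (descending score) list, return score of first keyword found, else 1
def pvPriority : List (String × Int) :=
  [("rape", 5), ("assault", 4), ("robbery", 4), ("burglary", 3),
   ("theft", 2), ("suspicious", 1), ("disturbance", 1)]

def pvFirstMatch (l : List (String × Int)) (tl : String) : Int :=
  match l with
  | [] => 1
  | (kw, score) :: rest => if PySem.Str.isIn kw tl then score else pvFirstMatch rest tl

def determine_severity_from_data_alt (text : String) : Int :=
  pvFirstMatch pvPriority (PySem.Str.lower text)

-- ===== PRECONDITION & SPEC =====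
def Spec_determine_severity_from_data (text : String) (out : Int) : Prop := out = determine_severity_from_data_alt text
instance (text : String) (out : Int) : Decidable (Spec_determine_severity_from_data text out) := by unfold Spec_determine_severity_from_data; infer_instance

-- ===== CLAIM (what is proved, stated in full; the proofs are below) =====
def Claim_equal_determine_severity_from_data : Prop := ∀ (text : String), Dom_determine_severity_from_data text → Spec_determine_severity_from_data text (determine_severity_from_data text)

-- ===== LEMMAS AND PROOFS =====

-- ===== VERDICT (by name: the statement is the Claim_ definition above) =====
theorem determine_severity_from_data_spec : Claim_equal_determine_severity_from_data := by
  intro text _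
  unfold Spec_determine_severity_from_data determine_severity_from_data determine_severity_from_data_alt
  cases h1 : PySem.Chars.isIn ['r','a','p','e'] (PySem.Chars.lower text.toList) <;>
  cases h2 : PySem.Chars.isIn ['a','s','s','a','u','l','t'] (PySem.Chars.lower text.toList) <;>
  cases h3 : PySem.Chars.isIn ['r','o','b','b','e','r','y'] (PySem.Chars.lower text.toList) <;>
  cases h4 : PySem.Chars.isIn ['b','u','r','g','l','a','r','y'] (PySem.Chars.lower text.toList) <;>
  cases h5 : PySem.Chars.isIn ['t','h','e','f','t'] (PySem.Chars.lower text.toList) <;>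
  cases h6 : PySem.Chars.isIn ['s','u','s','p','i','c','i','o','u','s'] (PySem.Chars.lower text.toList) <;>
  cases h7 : PySem.Chars.isIn ['d','i','s','t','u','r','b','a','n','c','e'] (PySem.Chars.lower text.toList) <;>
  simp [pvPriority, pvFirstMatch, PySem.Dict.ofList, PySem.Dict.update, PySem.Dict.empty,
        PySem.Dict.insert, PySem.Dict.contains, List.foldl,
        h1, h2, h3, h4, h5, h6, h7]
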